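-- pv_equiv track=rewrite | github.com/AnonymousWorks/OPERA | analyze_results/plot_time/plot_bug_time_v2.py | get_accumulate_bug_num
-- ===== SOURCE A (Python) =====
-- def get_accumulate_bug_num(bug_line_list, max_time):
--     cumulative_bug_list = []
--     cumulative_bug_num = 0
--     for i in range(max_time):
--         if i in bug_line_list:
--             cumulative_bug_num += bug_line_list.count(i)
--         cumulative_bug_list.append(cumulative_bug_num)
--     return cumulative_bug_list
-- ===== SOURCE B (Python) =====
-- def get_accumulate_bug_num(bug_line_list, max_time):
--     # sort the nonnegative bug times once, then sweep the time axis with a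
--     # pointer: after step i the pointer sits past all bugs with time <= i,
--     # so its position is the cumulative bug count.
--     s = sorted(x for x in bug_line_list if x >= 0)
--     out = []
--     p = 0
--     for i in range(max_time):
--         while p < len(s) and s[p] <= i:
--             p += 1
--         out.append(p)
--     return out
-- ===== Notes on version B (the rewrite author's own statement) =====
-- stated objective: faster
-- what changed: B sorts the nonnegative bug times once and then does a single two-pointer sweep over the time axis (the pointer position past all elements <= i IS the cumulative count), instead of A's per-step membership test plus list.count rescan.
import Mathlib
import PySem

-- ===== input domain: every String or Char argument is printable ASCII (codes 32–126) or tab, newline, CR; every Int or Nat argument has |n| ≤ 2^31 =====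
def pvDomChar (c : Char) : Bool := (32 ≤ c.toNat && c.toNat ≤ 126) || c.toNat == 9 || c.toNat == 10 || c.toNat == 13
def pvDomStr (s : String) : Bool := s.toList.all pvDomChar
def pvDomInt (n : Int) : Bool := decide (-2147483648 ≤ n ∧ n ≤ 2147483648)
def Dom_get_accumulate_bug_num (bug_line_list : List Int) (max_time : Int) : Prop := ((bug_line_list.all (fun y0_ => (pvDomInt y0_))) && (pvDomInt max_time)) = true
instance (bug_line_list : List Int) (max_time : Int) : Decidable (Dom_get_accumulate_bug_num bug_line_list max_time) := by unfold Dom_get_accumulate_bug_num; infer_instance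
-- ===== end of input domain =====

-- B sorts the nonnegative bug times once and sweeps the time axis with a pointer
-- (position past all elements ≤ i = cumulative count), replacing A's per-step
-- membership test + list.count rescan (faster: asymptotic).

-- ===== PORT A =====
def get_accumulate_bug_num (bug_line_list : List Int) (max_time : Int) : List Int :=
  ((PySem.List.pyRange 0 max_time 1).foldl (fun (st : List Int × Int) i =>
    let n := if i ∈ bug_line_list then st.2 + (PySem.List.count bug_line_list i : Int) else st.2
    (st.1 ++ [n], n)) ([], 0)).1

-- ===== PORT B =====
-- the inner 'while p < len(s) and s[p] <= i: p += 1' loop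
def pvAdvance (s : List Int) (i : Int) (p : Nat) : Nat :=
  if h : p < s.length then
    if s[p] ≤ i then pvAdvance s i (p + 1) else p
  else p
termination_by s.length - p

def get_accumulate_bug_num_alt (bug_line_list : List Int) (max_time : Int) : List Int :=
  let s := PySem.List.sorted (bug_line_list.filter (fun x => decide (0 ≤ x))) (fun x => x) false
  ((PySem.List.pyRange 0 max_time 1).foldl (fun (st : List Int × Nat) i =>
    let p := pvAdvance s i st.2
    (st.1 ++ [(p : Int)], p)) ([], 0)).1

-- ===== PRECONDITION & SPEC =====
def Spec_get_accumulate_bug_num (bug_line_list : List Int) (max_time : Int) (out : List Int) : Prop := out = get_accumulate_bug_num_alt bug_line_list max_time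
instance (bug_line_list : List Int) (max_time : Int) (out : List Int) : Decidable (Spec_get_accumulate_bug_num bug_line_list max_time out) := by unfold Spec_get_accumulate_bug_num; infer_instance

-- ===== CLAIM (what is proved, stated in full; the proofs are below) =====
def Claim_equal_get_accumulate_bug_num : Prop := ∀ (bug_line_list : List Int) (max_time : Int), Dom_get_accumulate_bug_num bug_line_list max_time → Spec_get_accumulate_bug_num bug_line_list max_time (get_accumulate_bug_num bug_line_list max_time)

-- ===== LEMMAS AND PROOFS =====

-- splitting the window [0, m] at its right end, a countP step
theorem pv_countP_step (l : List Int) (m : Int) (hm : 0 ≤ m) :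
    l.countP (fun x => decide (0 ≤ x ∧ x ≤ m)) =
      l.countP (fun x => decide (0 ≤ x ∧ x ≤ m - 1)) + l.count m := by
  induction l with
  | nil => simp
  | cons a l ih =>
    rw [List.countP_cons, List.countP_cons, List.count_cons, ih]
    by_cases h : a = m
    · subst h
      have h1 : decide (0 ≤ a ∧ a ≤ a) = true := decide_eq_true_eq.mpr ⟨hm, le_refl a⟩
      have h2 : decide (0 ≤ a ∧ a ≤ a - 1) = false := decide_eq_false_iff_not.mpr (by omega)
      rw [h1, h2]
      simp
      omega
    · have h1 : decide (0 ≤ a ∧ a ≤ m) = decide (0 ≤ a ∧ a ≤ m - 1) := decide_eq_decide.mpr (by omega)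
      rw [h1]
      simp [h]
      omega

-- characterisation of A: the running total after step i is the count of bugs in [0, i]
theorem pv_A_char (l : List Int) : ∀ (m : Int), 0 ≤ m →
    (PySem.List.pyRange 0 m 1).foldl (fun (st : List Int × Int) i =>
      let n := if i ∈ l then st.2 + (PySem.List.count l i : Int) else st.2
      (st.1 ++ [n], n)) ([], 0) =
    ((PySem.List.pyRange 0 m 1).map (fun i => (l.countP (fun x => decide (0 ≤ x ∧ x ≤ i)) : Int)),
      (l.countP (fun x => decide (0 ≤ x ∧ x ≤ m - 1)) : Int)) := by
  intro m hm
  induction m, hm using Int.le_induction with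
  | base =>
    rw [PySem.List.pyRange_one_eq_nil (le_refl 0)]
    simp only [List.foldl_nil, List.map_nil, Prod.mk.injEq]
    refine ⟨by simp, ?_⟩
    rw [List.countP_eq_zero.mpr (by intro a _; simp; omega)]
    simp
  | succ n hn ih =>
    rw [PySem.List.pyRange_one_succ_right hn, List.foldl_append, List.map_append, ih]
    simp only [List.foldl_cons, List.foldl_nil, List.map_cons, List.map_nil]
    have hval : (if n ∈ l then (l.countP (fun x => decide (0 ≤ x ∧ x ≤ n - 1)) : Int) + (PySem.List.count l n : Int)
        else (l.countP (fun x => decide (0 ≤ x ∧ x ≤ n - 1)) : Int)) =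
        (l.countP (fun x => decide (0 ≤ x ∧ x ≤ n)) : Int) := by
      rw [PySem.List.count_eq, pv_countP_step l n hn]
      by_cases h : n ∈ l
      · rw [if_pos h]; push_cast; ring
      · rw [if_neg h, List.count_eq_zero_of_not_mem h]; simp
    simp only [Prod.mk.injEq]
    refine ⟨by rw [hval], ?_⟩
    rw [show n + 1 - 1 = n by ring, hval]

-- on a sorted list, "s[j] ≤ i" holds exactly on the prefix of length countP (· ≤ i)
theorem pv_sorted_le_iff (i : Int) : ∀ (s : List Int), s.Pairwise (· ≤ ·) →
    ∀ (j : Nat) (hj : j < s.length), (s[j] ≤ i ↔ j < s.countP (fun x => decide (x ≤ i))) := by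
  intro s hs
  induction s with
  | nil => intro j hj; simp at hj
  | cons a t ih =>
    rw [List.pairwise_cons] at hs
    intro j hj
    cases j with
    | zero =>
      simp only [List.getElem_cons_zero, List.countP_cons]
      by_cases h : a ≤ i
      · simp [h]
      · have ht : t.countP (fun x => decide (x ≤ i)) = 0 :=
          List.countP_eq_zero.mpr (by intro b hb; simp; exact lt_of_lt_of_le (by omega) (hs.1 b hb))
        simp [h, ht]
    | succ k =>
      simp only [List.getElem_cons_succ, List.countP_cons]
      have hk : k < t.length := by simpa using hj
      rw [ih hs.2 k hk]
      by_cases h : a ≤ i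
      · simp [h]
      · have ht : t.countP (fun x => decide (x ≤ i)) = 0 :=
          List.countP_eq_zero.mpr (by intro b hb; simp; exact lt_of_lt_of_le (by omega) (hs.1 b hb))
        simp [h, ht]

-- the pointer loop lands exactly at countP (· ≤ i) when it starts at or before it
theorem pv_advance_eq (s : List Int) (i : Int) (hs : s.Pairwise (· ≤ ·)) :
    ∀ (d p : Nat), s.length - p ≤ d → p ≤ s.countP (fun x => decide (x ≤ i)) →
      pvAdvance s i p = s.countP (fun x => decide (x ≤ i)) := by
  intro d
  induction d with
  | zero =>
    intro p hd hp
    have hlen : s.length ≤ p := by omega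
    have hcl : s.countP (fun x => decide (x ≤ i)) ≤ s.length := List.countP_le_length
    rw [pvAdvance]
    rw [dif_neg (by omega)]
    omega
  | succ d ih =>
    intro p hd hp
    rw [pvAdvance]
    by_cases hlt : p < s.length
    · rw [dif_pos hlt]
      by_cases hle : s[p]'hlt ≤ i
      · rw [if_pos hle]
        have hpk : p < s.countP (fun x => decide (x ≤ i)) := (pv_sorted_le_iff i s hs p hlt).mp hle
        exact ih (p + 1) (by omega) (by omega)
      · rw [if_neg hle]
        have h2 : ¬ p < s.countP (fun x => decide (x ≤ i)) := fun hC =>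
          hle ((pv_sorted_le_iff i s hs p hlt).mpr hC)
        omega
    · rw [dif_neg hlt]
      have hcl : s.countP (fun x => decide (x ≤ i)) ≤ s.length := List.countP_le_length
      omega

-- characterisation of B's sweep: the pointer after step i is countP (· ≤ i)
theorem pv_B_char (s : List Int) (hs : s.Pairwise (· ≤ ·)) (hnn : ∀ x ∈ s, 0 ≤ x) :
    ∀ (m : Int), 0 ≤ m →
    (PySem.List.pyRange 0 m 1).foldl (fun (st : List Int × Nat) i =>
      let p := pvAdvance s i st.2
      (st.1 ++ [(p : Int)], p)) ([], 0) =
    ((PySem.List.pyRange 0 m 1).map (fun i => (s.countP (fun x => decide (x ≤ i)) : Int)),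
      s.countP (fun x => decide (x ≤ m - 1))) := by
  intro m hm
  induction m, hm using Int.le_induction with
  | base =>
    rw [PySem.List.pyRange_one_eq_nil (le_refl 0)]
    simp only [List.foldl_nil, List.map_nil, Prod.mk.injEq]
    refine ⟨by simp, ?_⟩
    exact (List.countP_eq_zero.mpr (by intro a ha; simp; have := hnn a ha; omega)).symm
  | succ n hn ih =>
    rw [PySem.List.pyRange_one_succ_right hn, List.foldl_append, List.map_append, ih]
    simp only [List.foldl_cons, List.foldl_nil, List.map_cons, List.map_nil]
    have hmono : s.countP (fun x => decide (x ≤ n - 1)) ≤ s.countP (fun x => decide (x ≤ n)) :=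
      List.countP_mono_left (by intro x _ h; simp at h ⊢; omega)
    have hadv := pv_advance_eq s n hs s.length (s.countP (fun x => decide (x ≤ n - 1)))
      (by omega) hmono
    simp only [hadv, Prod.mk.injEq]
    refine ⟨trivial, ?_⟩
    rw [show n + 1 - 1 = n by ring]

-- the two per-step counts are the same number
theorem pv_count_bridge (l : List Int) (i : Int) :
    (PySem.List.sorted (l.filter (fun x => decide (0 ≤ x))) (fun x => x) false).countP
        (fun x => decide (x ≤ i)) =
      l.countP (fun x => decide (0 ≤ x ∧ x ≤ i)) := by
  rw [List.Perm.countP_eq _ (PySem.List.sorted_perm _ _ _), List.countP_filter]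
  exact List.countP_congr (by intro x _; simp; tauto)

-- ===== VERDICT (by name: the statement is the Claim_ definition above) =====
theorem get_accumulate_bug_num_spec : Claim_equal_get_accumulate_bug_num := by
  intro l m _
  unfold Spec_get_accumulate_bug_num get_accumulate_bug_num get_accumulate_bug_num_alt
  by_cases hm : 0 ≤ m
  · have hs : (PySem.List.sorted (l.filter (fun x => decide (0 ≤ x))) (fun x => x) false).Pairwise (· ≤ ·) :=
      PySem.List.sorted_pairwise _ _
    have hnn : ∀ x ∈ PySem.List.sorted (l.filter (fun x => decide (0 ≤ x))) (fun x => x) false, 0 ≤ x := by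
      intro x hx
      rw [PySem.List.mem_sorted] at hx
      simpa using (List.mem_filter.mp hx).2
    rw [pv_A_char l m hm]
    dsimp only
    rw [pv_B_char _ hs hnn m hm]
    dsimp only
    exact List.map_congr_left (by intro i _; rw [pv_count_bridge l i])
  · rw [PySem.List.pyRange_one_eq_nil (by omega)]
    rfl
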